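-- pv_equiv track=rewrite | github.com/asintha811-blip/IntelliScan | engine/analyzer.py | reflected_context_is_risky
-- ===== SOURCE A (Python) =====
-- def reflected_context_is_risky(body: str, marker: str) -> bool:
--     low = body.lower()
--     marker_low = marker.lower()
--
--     risky_patterns = [
--         f"<script>{marker_low}</script>",
--         f"\"{marker_low}\"",
--         f"'{marker_low}'",
--         f"value=\"{marker_low}\"",
--         f">{marker_low}<",
--     ]
--
--     return any(pattern in low for pattern in risky_patterns)
-- ===== SOURCE B (Python) =====
-- def reflected_context_is_risky(body: str, marker: str) -> bool:
--     low = body.lower()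
--     m = marker.lower()
--     n = len(m)
--     if len(low) < n:
--         return False
--     pairs = [("<script>", "</script>"), ('"', '"'), ("'", "'"), ('value="', '"'), (">", "<")]
--     for i in range(len(low) - n + 1):
--         if low[i:i + n] != m:
--             continue
--         for p, s in pairs:
--             if i >= len(p) and low[i - len(p):i] == p and low[i + n:i + n + len(s)] == s:
--                 return True
--     return False
-- ===== Notes on version B (the rewrite author's own statement) =====
-- stated objective: alternative
-- what changed: Instead of building five whole patterns and running five substring searches over the body, B scans the lowered body once for every occurrence of the lowered marker and checks the constant-size (prefix, suffix) context pair around each occurrence.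
import Mathlib
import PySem

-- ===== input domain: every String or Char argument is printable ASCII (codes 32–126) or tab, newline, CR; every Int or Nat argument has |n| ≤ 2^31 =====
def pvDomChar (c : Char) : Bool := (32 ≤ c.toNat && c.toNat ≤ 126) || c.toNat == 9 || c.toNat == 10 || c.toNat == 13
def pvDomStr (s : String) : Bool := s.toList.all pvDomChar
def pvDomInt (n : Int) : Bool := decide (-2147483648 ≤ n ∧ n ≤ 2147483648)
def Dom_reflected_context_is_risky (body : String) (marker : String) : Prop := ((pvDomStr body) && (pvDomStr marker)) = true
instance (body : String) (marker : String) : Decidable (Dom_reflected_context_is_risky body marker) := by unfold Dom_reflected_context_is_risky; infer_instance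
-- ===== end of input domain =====

-- B replaces A's five whole-body substring searches by one scan over marker occurrences
-- with constant-size context checks around each occurrence (objective: alternative decomposition).

-- ===== PORT A =====
def reflected_context_is_risky (body : String) (marker : String) : Bool :=
  let low := PySem.Chars.lower body.toList
  let marker_low := PySem.Chars.lower marker.toList
  let risky_patterns : List (List Char) :=
    [ "<script>".toList ++ marker_low ++ "</script>".toList,
      "\"".toList ++ marker_low ++ "\"".toList,
      "'".toList ++ marker_low ++ "'".toList,
      "value=\"".toList ++ marker_low ++ "\"".toList,
      ">".toList ++ marker_low ++ "<".toList ]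
  risky_patterns.any (fun pattern => PySem.Chars.isIn pattern low)

-- ===== PORT B =====
def pvPairs : List (List Char × List Char) :=
  [ ("<script>".toList, "</script>".toList),
    ("\"".toList, "\"".toList),
    ("'".toList, "'".toList),
    ("value=\"".toList, "\"".toList),
    (">".toList, "<".toList) ]

def pvScan (low m : List Char) : Bool :=
  if low.length < m.length then false
  else
    (List.range (low.length - m.length + 1)).any (fun i =>
      ((low.drop i).take m.length == m) &&
      pvPairs.any (fun ps =>
        decide (ps.1.length ≤ i) &&
        ((low.drop (i - ps.1.length)).take ps.1.length == ps.1) &&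
        ((low.drop (i + m.length)).take ps.2.length == ps.2)))

def reflected_context_is_risky_alt (body : String) (marker : String) : Bool :=
  pvScan (PySem.Chars.lower body.toList) (PySem.Chars.lower marker.toList)

-- ===== PRECONDITION & SPEC =====
def Spec_reflected_context_is_risky (body : String) (marker : String) (out : Bool) : Prop := out = reflected_context_is_risky_alt body marker
instance (body : String) (marker : String) (out : Bool) : Decidable (Spec_reflected_context_is_risky body marker out) := by unfold Spec_reflected_context_is_risky; infer_instance

-- ===== CLAIM (what is proved, stated in full; the proofs are below) =====
def Claim_equal_reflected_context_is_risky : Prop := ∀ (body : String) (marker : String), Dom_reflected_context_is_risky body marker → Spec_reflected_context_is_risky body marker (reflected_context_is_risky body marker)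

-- ===== LEMMAS AND PROOFS =====

-- Splitting a suffix at a known prefix: if taking |y| chars after position k yields y,
-- then the suffix at k is y followed by the suffix at k + |y|.
theorem pv_drop_split (l : List Char) (k : Nat) (y : List Char)
    (h : (l.drop k).take y.length = y) :
    l.drop k = y ++ l.drop (k + y.length) := by
  conv_lhs => rw [← List.take_append_drop y.length (l.drop k)]
  rw [h, List.drop_drop]

-- A pattern p ++ m ++ s occurs in l iff m occurs at some index i with p immediately
-- before it and s immediately after it.
theorem pv_infix_iff (p m s l : List Char) :
    (p ++ m ++ s <:+: l) ↔
      ∃ i, i + m.length ≤ l.length ∧ (l.drop i).take m.length = m ∧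
        p.length ≤ i ∧ (l.drop (i - p.length)).take p.length = p ∧
        (l.drop (i + m.length)).take s.length = s := by
  constructor
  · rintro ⟨t, u, rfl⟩
    refine ⟨t.length + p.length, ?_, ?_, by omega, ?_, ?_⟩
    · simp only [List.length_append]
      omega
    · have e : t ++ (p ++ m ++ s) ++ u = (t ++ p) ++ (m ++ (s ++ u)) := by
        simp [List.append_assoc]
      rw [e, List.drop_left' (by rw [List.length_append]), List.take_left' rfl]
    · have e : t ++ (p ++ m ++ s) ++ u = t ++ (p ++ (m ++ (s ++ u))) := by
        simp [List.append_assoc]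
      have hi : t.length + p.length - p.length = t.length := by omega
      rw [e, hi, List.drop_left' rfl, List.take_left' rfl]
    · have e : t ++ (p ++ m ++ s) ++ u = ((t ++ p) ++ m) ++ (s ++ u) := by
        simp [List.append_assoc]
      rw [e, List.drop_left' (by simp only [List.length_append]), List.take_left' rfl]
  · rintro ⟨i, hlen, hm, hpi, hp, hs⟩
    have e1 : l.drop (i - p.length) = p ++ l.drop i := by
      have := pv_drop_split l (i - p.length) p hp
      rwa [Nat.sub_add_cancel hpi] at this
    have e2 : l.drop i = m ++ l.drop (i + m.length) := pv_drop_split l i m hm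
    have e3 : l.drop (i + m.length) = s ++ l.drop (i + m.length + s.length) :=
      pv_drop_split l (i + m.length) s hs
    refine ⟨l.take (i - p.length), l.drop (i + m.length + s.length), ?_⟩
    conv_rhs => rw [← List.take_append_drop (i - p.length) l]
    rw [e1, e2, e3]
    simp [List.append_assoc]

-- What B's scan asserts, in Prop form (the range bound already converted to i + |m| ≤ |low|).
theorem pv_scan_iff (low m : List Char) (h : ¬ low.length < m.length) :
    pvScan low m = true ↔
      ∃ i, i + m.length ≤ low.length ∧ (low.drop i).take m.length = m ∧
        ∃ pr ∈ pvPairs, pr.1.length ≤ i ∧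
          (low.drop (i - pr.1.length)).take pr.1.length = pr.1 ∧
          (low.drop (i + m.length)).take pr.2.length = pr.2 := by
  unfold pvScan
  rw [if_neg h]
  simp only [List.any_eq_true, List.mem_range, Bool.and_eq_true, beq_iff_eq,
    decide_eq_true_eq]
  constructor
  · rintro ⟨i, hi, hocc, pr, hpr, ⟨h1, h2⟩, h3⟩
    exact ⟨i, by omega, hocc, pr, hpr, h1, h2, h3⟩
  · rintro ⟨i, hi, hocc, pr, hpr, h1, h2, h3⟩
    exact ⟨i, by omega, hocc, pr, hpr, ⟨h1, h2⟩, h3⟩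

-- Core equality of the two computations, on the lowered character lists.
theorem pv_core (low m : List Char) :
    ([ "<script>".toList ++ m ++ "</script>".toList,
       "\"".toList ++ m ++ "\"".toList,
       "'".toList ++ m ++ "'".toList,
       "value=\"".toList ++ m ++ "\"".toList,
       ">".toList ++ m ++ "<".toList ].any (fun pattern => PySem.Chars.isIn pattern low))
      = pvScan low m := by
  rw [Bool.eq_iff_iff]
  by_cases h : low.length < m.length
  · constructor
    · intro hA
      exfalso
      simp only [List.any_eq_true, List.mem_cons, List.not_mem_nil, or_false] at hA
      rcases hA with ⟨pat, hpat, hin⟩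
      have hinf : pat <:+: low := (PySem.Chars.isIn_iff_infix pat low).mp hin
      have hle := hinf.length_le
      rcases hpat with rfl | rfl | rfl | rfl | rfl <;>
        · rw [List.length_append, List.length_append] at hle
          omega
    · intro hB
      exfalso
      unfold pvScan at hB
      rw [if_pos h] at hB
      exact Bool.false_ne_true hB
  · rw [pv_scan_iff low m h]
    simp only [List.any_eq_true, List.mem_cons, List.not_mem_nil, or_false,
      exists_eq_or_imp, exists_eq_left, PySem.Chars.isIn_iff_infix, pv_infix_iff, pvPairs]
    constructor
    · rintro (⟨i, h1, h2, h3, h4, h5⟩ | ⟨i, h1, h2, h3, h4, h5⟩ | ⟨i, h1, h2, h3, h4, h5⟩ |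
        ⟨i, h1, h2, h3, h4, h5⟩ | ⟨i, h1, h2, h3, h4, h5⟩)
      · exact ⟨i, h1, h2, Or.inl ⟨h3, h4, h5⟩⟩
      · exact ⟨i, h1, h2, Or.inr (Or.inl ⟨h3, h4, h5⟩)⟩
      · exact ⟨i, h1, h2, Or.inr (Or.inr (Or.inl ⟨h3, h4, h5⟩))⟩
      · exact ⟨i, h1, h2, Or.inr (Or.inr (Or.inr (Or.inl ⟨h3, h4, h5⟩)))⟩
      · exact ⟨i, h1, h2, Or.inr (Or.inr (Or.inr (Or.inr ⟨h3, h4, h5⟩)))⟩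
    · rintro ⟨i, h1, h2, (⟨h3, h4, h5⟩ | ⟨h3, h4, h5⟩ | ⟨h3, h4, h5⟩ | ⟨h3, h4, h5⟩ |
        ⟨h3, h4, h5⟩)⟩
      · exact Or.inl ⟨i, h1, h2, h3, h4, h5⟩
      · exact Or.inr (Or.inl ⟨i, h1, h2, h3, h4, h5⟩)
      · exact Or.inr (Or.inr (Or.inl ⟨i, h1, h2, h3, h4, h5⟩))
      · exact Or.inr (Or.inr (Or.inr (Or.inl ⟨i, h1, h2, h3, h4, h5⟩)))
      · exact Or.inr (Or.inr (Or.inr (Or.inr ⟨i, h1, h2, h3, h4, h5⟩)))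

-- ===== VERDICT (by name: the statement is the Claim_ definition above) =====
theorem reflected_context_is_risky_spec : Claim_equal_reflected_context_is_risky := by
  intro body marker _
  unfold Spec_reflected_context_is_risky reflected_context_is_risky reflected_context_is_risky_alt
  exact pv_core (PySem.Chars.lower body.toList) (PySem.Chars.lower marker.toList)
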